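-- pv_equiv track=rewrite | github.com/dimamik/AGH_Algorithms_and_data_structures | LATO_FOR_EXAM/Sortowania/ALL/Zad_1_Swaps.py | Zad_1a
-- ===== SOURCE A (Python) =====
-- def Binary_Search_Recursive(tab, el_searching, start=0, end=-1):
--     if end == -1:
--         end = len(tab)
--     if start >= end:
--         return -1
--
--     mid = (start+end)//2
--     if tab[mid] == el_searching:
--         return mid
--
--     elif tab[mid] > el_searching:
--         return Binary_Search_Recursive(tab, el_searching, start, mid)
--     elif tab[mid] < el_searching:
--         return Binary_Search_Recursive(tab, el_searching, mid+1, end)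
--
-- def Zad_1a(tab):
--     tab_sorted = sorted(tab)
--     swaps=0
--     for i in range(len(tab)):
--         index = Binary_Search_Recursive(tab_sorted,tab[i])
--         index = abs(len(tab)-1-index)
--         if (index != i):
--             tab[i],tab[index] = tab[index],tab[i]
--             swaps+=1
--     return swaps
-- ===== SOURCE B (Python) =====
-- # B: precomputes each distinct value's reversed target index once (iterative
-- # binary search + dict) instead of re-running a recursive search per element.
-- # Like A, mutates tab in place (same swaps); equivalence is about the return value.
-- def _bisect_index(tab, el):
--     start, end = 0, len(tab)
--     while start < end:
--         mid = (start + end) // 2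
--         if tab[mid] == el:
--             return mid
--         if tab[mid] > el:
--             end = mid
--         else:
--             start = mid + 1
--     return -1
--
-- def Zad_1a(tab):
--     n = len(tab)
--     tab_sorted = sorted(tab)
--     pos = {}
--     for v in tab_sorted:
--         if v not in pos:
--             pos[v] = n - 1 - _bisect_index(tab_sorted, v)
--     swaps = 0
--     for i in range(n):
--         j = pos[tab[i]]
--         if j != i:
--             tab[i], tab[j] = tab[j], tab[i]
--             swaps += 1
--     return swaps
-- ===== Notes on version B (the rewrite author's own statement) =====
-- stated objective: alternative
-- what changed: B replaces A's per-element recursive binary search by a position table: one iterative binary search per distinct value, stored in a dict built once, then a plain swap loop that only does dict lookups.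
import Mathlib
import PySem

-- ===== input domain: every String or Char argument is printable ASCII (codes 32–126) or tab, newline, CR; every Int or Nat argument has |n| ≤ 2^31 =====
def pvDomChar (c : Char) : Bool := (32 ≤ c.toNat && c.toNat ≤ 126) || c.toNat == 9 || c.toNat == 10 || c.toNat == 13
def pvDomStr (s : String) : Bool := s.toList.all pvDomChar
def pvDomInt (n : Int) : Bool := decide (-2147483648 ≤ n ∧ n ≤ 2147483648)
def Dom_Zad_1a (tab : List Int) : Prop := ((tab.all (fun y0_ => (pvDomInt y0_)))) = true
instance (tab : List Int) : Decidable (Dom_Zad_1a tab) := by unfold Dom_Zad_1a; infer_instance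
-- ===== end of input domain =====

-- B replaces A's per-element recursive binary search by a dict mapping each distinct
-- value to its reversed sorted position (one iterative search per distinct value);
-- both Pythons mutate tab in place identically — the theorem is about the return value.


-- ===== PORT A =====
-- Binary_Search_Recursive, fuel-guarded (fuel = len+1 always suffices; 0-fuel branch unreachable)
def pvBSRec (tab : List Int) (el : Int) (start e : Int) : Nat → Int
  | 0 => -1
  | fuel+1 =>
    let e := if e = -1 then (tab.length : Int) else e
    if start ≥ e then -1
    else
      let mid := PySem.Int.floordiv (start + e) 2
      let v := PySem.List.pyGetD tab mid 0
      if v = el then mid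
      else if v > el then pvBSRec tab el start mid fuel
      else pvBSRec tab el (mid + 1) e fuel

-- the body of A's for-loop (state = (tab, swaps))
def pvStepA (ts : List Int) (st : List Int × Int) (i : Int) : List Int × Int :=
  let idx := pvBSRec ts (PySem.List.pyGetD st.1 i 0) 0 (-1) (ts.length + 1)
  let idx := |(st.1.length : Int) - 1 - idx|
  if idx ≠ i then
    (PySem.List.pySetD (PySem.List.pySetD st.1 i (PySem.List.pyGetD st.1 idx 0)) idx
       (PySem.List.pyGetD st.1 i 0), st.2 + 1)
  else st

def Zad_1a (tab : List Int) : Int :=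
  let ts := PySem.List.sorted tab (fun x => x) false
  ((PySem.List.pyRange 0 (tab.length) 1).foldl (pvStepA ts) (tab, 0)).2

-- ===== PORT B =====
-- _bisect_index: iterative while-loop as tail recursion on fuel (fuel = len+1 suffices)
def pvBSIter (tab : List Int) (el : Int) (start e : Int) : Nat → Int
  | 0 => -1
  | fuel+1 =>
    if start < e then
      let mid := PySem.Int.floordiv (start + e) 2
      let v := PySem.List.pyGetD tab mid 0
      if v = el then mid
      else if v > el then pvBSIter tab el start mid fuel
      else pvBSIter tab el (mid + 1) e fuel
    else -1

-- pos[v] for B's dict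
def pvPosVal (ts : List Int) (n : Int) (v : Int) : Int :=
  n - 1 - pvBSIter ts v 0 (ts.length) (ts.length + 1)

-- B's dict-building loop
def pvPos (ts : List Int) (n : Int) : PySem.Dict Int Int :=
  ts.foldl (fun d v => if d.contains v then d else d.insert v (pvPosVal ts n v)) PySem.Dict.empty

-- the body of B's swap loop
def pvStepB (pos : PySem.Dict Int Int) (st : List Int × Int) (i : Int) : List Int × Int :=
  let j := pos.getD (PySem.List.pyGetD st.1 i 0) 0
  if j ≠ i then
    (PySem.List.pySetD (PySem.List.pySetD st.1 i (PySem.List.pyGetD st.1 j 0)) j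
       (PySem.List.pyGetD st.1 i 0), st.2 + 1)
  else st

def Zad_1a_alt (tab : List Int) : Int :=
  let n := (tab.length : Int)
  let ts := PySem.List.sorted tab (fun x => x) false
  let pos := pvPos ts n
  ((PySem.List.pyRange 0 n 1).foldl (pvStepB pos) (tab, 0)).2

-- ===== PRECONDITION & SPEC =====
def Spec_Zad_1a (tab : List Int) (out : Int) : Prop := out = Zad_1a_alt tab
instance (tab : List Int) (out : Int) : Decidable (Spec_Zad_1a tab out) := by unfold Spec_Zad_1a; infer_instance

-- ===== CLAIM (what is proved, stated in full; the proofs are below) =====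
def Claim_equal_Zad_1a : Prop := ∀ (tab : List Int), Dom_Zad_1a tab → Spec_Zad_1a tab (Zad_1a tab)

-- ===== LEMMAS AND PROOFS =====

-- recursive and iterative search agree for nonnegative bounds
theorem pvBS_rec_eq_iter (tab : List Int) (el : Int) :
    ∀ (fuel : Nat) (s e : Int), 0 ≤ s → 0 ≤ e →
      pvBSRec tab el s e fuel = pvBSIter tab el s e fuel := by
  intro fuel
  induction fuel with
  | zero => intro s e _ _; rfl
  | succ f ih =>
    intro s e hs he
    simp only [pvBSRec, pvBSIter]
    have hne : ¬ (e = -1) := by omega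
    simp only [hne, if_false]
    by_cases hlt : s < e
    · have hge : ¬ (s ≥ e) := by omega
      have hmid : 0 ≤ PySem.Int.floordiv (s + e) 2 := by
        rw [PySem.Int.floordiv_eq_ediv_of_pos (by omega)]; omega
      simp only [hge, if_false, hlt, if_true]
      split_ifs with h1 h2
      · rfl
      · exact ih s _ hs hmid
      · exact ih _ e (by omega) he
    · have hge : s ≥ e := by omega
      simp [hge, hlt]

-- A's initial call (end = -1) equals the iterative search on [0, len)
theorem pvBS_init (tab : List Int) (el : Int) (fuel : Nat) :
    pvBSRec tab el 0 (-1) fuel = pvBSIter tab el 0 (tab.length) fuel := by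
  have h : pvBSRec tab el 0 (-1) fuel = pvBSRec tab el 0 (tab.length) fuel := by
    cases fuel with
    | zero => rfl
    | succ f =>
      simp only [pvBSRec]
      have : ¬ ((tab.length : Int) = -1) := by omega
      simp [this]
  rw [h]
  exact pvBS_rec_eq_iter tab el _ 0 _ (by omega) (by omega)

-- completeness + bounds: if el occurs in the sorted window, the search returns an index inside it
theorem pvBSIter_mem (tab : List Int) (el : Int) (hsort : tab.Pairwise (· ≤ ·)) :
    ∀ (fuel : Nat) (s e : Int), 0 ≤ s → e ≤ tab.length → (e - s).toNat < fuel →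
      (∃ j : Nat, (j : Int) ≥ s ∧ (j : Int) < e ∧ ∃ hj : j < tab.length, tab[j] = el) →
      s ≤ pvBSIter tab el s e fuel ∧ pvBSIter tab el s e fuel < e := by
  intro fuel
  induction fuel with
  | zero => intro s e hs _ hf hex; obtain ⟨j, h1, h2, _⟩ := hex; omega
  | succ f ih =>
    intro s e hs he hf hex
    obtain ⟨j, hjs, hje, hjlen, hjel⟩ := hex
    have hse : s < e := by omega
    have hmb : s ≤ PySem.Int.floordiv (s + e) 2 ∧ PySem.Int.floordiv (s + e) 2 < e := by
      rw [PySem.Int.floordiv_eq_ediv_of_pos (by omega)]; omega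
    have hpw := List.pairwise_iff_getElem.1 hsort
    simp only [pvBSIter]
    rw [if_pos hse]
    set m := PySem.Int.floordiv (s + e) 2 with hm
    have hmlen : m < (tab.length : Int) := by omega
    have hv : PySem.List.pyGetD tab m 0 = tab[m.toNat] :=
      PySem.List.pyGetD_eq_getElem tab 0 (by omega) hmlen
    split_ifs with h1 h2
    · exact hmb
    · -- tab[m] > el : recurse on [s, m)
      have hjm : (j : Int) < m := by
        by_contra hc
        have hmj : m.toNat ≤ j := by omega
        rcases Nat.lt_or_ge m.toNat j with hlt | hge
        · have := hpw m.toNat j (by omega) hjlen hlt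
          rw [hjel] at this
          rw [hv] at h2
          omega
        · have hmjeq : m.toNat = j := by omega
          subst hmjeq
          apply h1
          rw [hv, hjel]
      have := ih s m hs (by omega) (by omega) ⟨j, hjs, hjm, hjlen, hjel⟩
      exact ⟨this.1, by omega⟩
    · -- tab[m] < el : recurse on [m+1, e)
      have hjm : m + 1 ≤ (j : Int) := by
        by_contra hc
        rcases Nat.lt_or_ge j m.toNat with hlt | hge
        · have := hpw j m.toNat hjlen (by omega) hlt
          rw [hjel, hv] at *
          have hvlt : tab[m.toNat] ≠ el := h1
          omega
        · have hmjeq : m.toNat = j := by omega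
          subst hmjeq
          apply h1
          rw [hv, hjel]
      have := ih (m + 1) e (by omega) he (by omega) ⟨j, by omega, hje, hjlen, hjel⟩
      exact ⟨by omega, this.2⟩

-- dict lemmas: every value stored by the build loop is pvPosVal of its key
theorem pvPos_step_inv (ts : List Int) (n x : Int) (acc : PySem.Dict Int Int)
    (h : ∀ k, acc.get? k = none ∨ acc.get? k = some (pvPosVal ts n k)) :
    ∀ k, (if acc.contains x then acc else acc.insert x (pvPosVal ts n x)).get? k = none ∨
         (if acc.contains x then acc else acc.insert x (pvPosVal ts n x)).get? k = some (pvPosVal ts n k) := by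
  intro k
  split_ifs with hc
  · exact h k
  · rw [PySem.Dict.get?_insert]
    by_cases hk : k = x
    · subst hk; simp
    · simp only [hk, if_false]
      exact h k

-- a key already mapped to its pvPosVal stays so through the rest of the build loop
theorem pvPos_pres (ts : List Int) (n : Int) :
    ∀ (l : List Int) (acc : PySem.Dict Int Int) (v : Int),
      acc.get? v = some (pvPosVal ts n v) →
      (l.foldl (fun d x => if d.contains x then d else d.insert x (pvPosVal ts n x)) acc).get? v
        = some (pvPosVal ts n v) := by
  intro l
  induction l with
  | nil => intro acc v h; exact h
  | cons x xs ih =>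
    intro acc v h
    simp only [List.foldl_cons]
    apply ih
    split_ifs with hc
    · exact h
    · have hvx : v ≠ x := by
        intro he; subst he
        rw [PySem.Dict.contains_eq_isSome_get?, h] at hc
        simp at hc
      rw [PySem.Dict.get?_insert]
      simp only [hvx, if_false]
      exact h

theorem pvPos_get? (ts : List Int) (n : Int) :
    ∀ (l : List Int) (acc : PySem.Dict Int Int) (v : Int),
      (∀ k, acc.get? k = none ∨ acc.get? k = some (pvPosVal ts n k)) → v ∈ l →
      (l.foldl (fun d x => if d.contains x then d else d.insert x (pvPosVal ts n x)) acc).get? v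
        = some (pvPosVal ts n v) := by
  intro l
  induction l with
  | nil => intro acc v _ hv; exact absurd hv (List.not_mem_nil)
  | cons x xs ih =>
    intro acc v hinv hv
    simp only [List.foldl_cons]
    rcases List.mem_cons.1 hv with he | hm
    · subst he
      apply pvPos_pres
      split_ifs with hc
      · rcases hinv v with h0 | h1
        · rw [PySem.Dict.contains_eq_isSome_get?, h0] at hc; simp at hc
        · exact h1
      · exact PySem.Dict.get?_insert_self acc v _
    · exact ih _ v (pvPos_step_inv ts n x acc hinv) hm

theorem pvPos_getD (ts : List Int) (n : Int) (v : Int) (hv : v ∈ ts) :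
    (pvPos ts n).getD v 0 = pvPosVal ts n v := by
  have h := pvPos_get? ts n ts PySem.Dict.empty v (fun k => Or.inl (PySem.Dict.get?_empty k)) hv
  unfold pvPos
  rw [PySem.Dict.getD_eq_get?_getD, h]
  rfl

-- one loop step: the two step functions agree and preserve the invariant
theorem pvStep_eq (tab : List Int) (st : List Int × Int) (i : Int)
    (hi : 0 ≤ i) (hin : i < (tab.length : Int))
    (hlen : st.1.length = tab.length) (hmem : ∀ x ∈ st.1, x ∈ tab) :
    pvStepA (PySem.List.sorted tab (fun x => x) false) st i
      = pvStepB (pvPos (PySem.List.sorted tab (fun x => x) false) (tab.length)) st i ∧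
    (pvStepA (PySem.List.sorted tab (fun x => x) false) st i).1.length = tab.length ∧
    (∀ x ∈ (pvStepA (PySem.List.sorted tab (fun x => x) false) st i).1, x ∈ tab) := by
  set ts := PySem.List.sorted tab (fun x => x) false with hts
  have hlts : ts.length = tab.length := by rw [hts]; simp [PySem.List.length_sorted]
  have hsort : ts.Pairwise (· ≤ ·) := by
    rw [hts]; simpa using PySem.List.sorted_pairwise tab (fun x => x)
  set el := PySem.List.pyGetD st.1 i 0 with hel
  have helmem : el ∈ st.1 := by
    apply PySem.List.pyGetD_mem
    simp [PySem.Raise.InRange]; omega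
  have helts : el ∈ ts := by
    rw [hts, PySem.List.mem_sorted]
    exact hmem el helmem
  obtain ⟨k, hk, hkel⟩ := List.getElem_of_mem helts
  have hr := pvBSIter_mem ts el hsort (ts.length + 1) 0 (ts.length) (by omega) (by omega)
      (by omega) ⟨k, by omega, by exact_mod_cast hk, hk, hkel⟩
  set r := pvBSIter ts el 0 (ts.length) (ts.length + 1) with hrdef
  have hrec : pvBSRec ts el 0 (-1) (ts.length + 1) = r := pvBS_init ts el (ts.length + 1)
  have habs : |(st.1.length : Int) - 1 - r| = (tab.length : Int) - 1 - r := by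
    rw [hlen]; exact abs_of_nonneg (by omega)
  have hd : (pvPos ts (tab.length : Int)).getD el 0 = (tab.length : Int) - 1 - r := by
    rw [pvPos_getD ts (tab.length : Int) el helts]; rfl
  set j := (tab.length : Int) - 1 - r with hj
  have hj0 : 0 ≤ j := by omega
  have hjlen : j < (st.1.length : Int) := by omega
  have hstep : pvStepA ts st i = pvStepB (pvPos ts (tab.length : Int)) st i := by
    simp only [pvStepA, pvStepB, ← hel, hrec, habs, hd]
  refine ⟨hstep, ?_, ?_⟩
  · simp only [pvStepA, ← hel, hrec, habs]
    split_ifs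
    · simp only [PySem.List.pySetD_of_nonneg _ _ hj0, PySem.List.pySetD_of_nonneg _ _ hi,
        List.length_set]
      exact hlen
    · exact hlen
  · simp only [pvStepA, ← hel, hrec, habs]
    split_ifs
    · intro x hx
      simp only [PySem.List.pySetD_of_nonneg _ _ hj0, PySem.List.pySetD_of_nonneg _ _ hi] at hx
      rcases List.mem_or_eq_of_mem_set hx with hx1 | hx2
      · rcases List.mem_or_eq_of_mem_set hx1 with hy1 | hy2
        · exact hmem x hy1
        · subst hy2
          apply hmem
          apply PySem.List.pyGetD_mem
          simp [PySem.Raise.InRange]; omega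
      · subst hx2
        exact hmem el helmem
    · exact hmem

theorem pvFold_eq (tab : List Int) :
    ∀ (l : List Int) (st : List Int × Int),
      (∀ i ∈ l, 0 ≤ i ∧ i < (tab.length : Int)) →
      st.1.length = tab.length → (∀ x ∈ st.1, x ∈ tab) →
      l.foldl (pvStepA (PySem.List.sorted tab (fun x => x) false)) st
        = l.foldl (pvStepB (pvPos (PySem.List.sorted tab (fun x => x) false) (tab.length))) st := by
  intro l
  induction l with
  | nil => intro st _ _ _; rfl
  | cons i l ih =>
    intro st hb hlen hmem
    have hi := hb i (List.mem_cons_self ..)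
    obtain ⟨heq, hlen', hmem'⟩ := pvStep_eq tab st i hi.1 hi.2 hlen hmem
    simp only [List.foldl_cons]
    rw [← heq]
    exact ih _ (fun j hj => hb j (List.mem_cons_of_mem _ hj)) hlen' hmem'

-- ===== VERDICT (by name: the statement is the Claim_ definition above) =====
theorem Zad_1a_spec : Claim_equal_Zad_1a := by
  intro tab _
  unfold Spec_Zad_1a Zad_1a Zad_1a_alt
  exact congrArg Prod.snd (pvFold_eq tab _ (tab, 0)
    (fun i hi => by
      have := (PySem.List.mem_pyRange_one (x := i) (a := 0) (b := (tab.length : Int))).1 hi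
      exact ⟨this.1, this.2⟩)
    rfl (fun x hx => hx))
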